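-- pv_equiv track=rewrite | github.com/baidu/QCompute | QCompute/QPlatform/Processor/PostProcessor.py | filterMeasure
-- ===== SOURCE A (Python) =====
-- from typing import Dict, Union
--
-- def filterMeasure(counts: Dict[str, int], measuredQRegsToCRegsDict: Dict[int, int]
--                   , reverse: bool = False) -> Dict[str, int]:
--     # return counts
--
--     sourceQRegCount = 0
--     for key in counts.keys():
--         sourceQRegCount = len(key)
--         break
--
--     assert sourceQRegCount > 0
--
--     neededQRegCount = max(measuredQRegsToCRegsDict.keys()) + 1
--     if neededQRegCount > sourceQRegCount:
--         neededQRegList = sorted(measuredQRegsToCRegsDict.keys())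
--         newQRegsToCRegsDict = {}
--         for index, key in enumerate(neededQRegList):
--             newQRegsToCRegsDict[index] = measuredQRegsToCRegsDict[key]
--         measuredQRegsToCRegsDict = newQRegsToCRegsDict
--
--     qRegList = list(measuredQRegsToCRegsDict.keys())
--     qRegCount = len(measuredQRegsToCRegsDict)
--     targetList = sorted(measuredQRegsToCRegsDict.values())
--     for key in measuredQRegsToCRegsDict.keys():
--         measuredQRegsToCRegsDict[key] = targetList.index(measuredQRegsToCRegsDict[key])
--
--     zeroKey = '0' * qRegCount
--     binRet: Dict[str, int] = {}
--     for k, v in counts.items():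
--         hit = False
--         for qReg in qRegList:
--             if k[sourceQRegCount - 1 - qReg] == '1':
--                 hit = True
--                 break
--         if hit:
--             keyList = ['0'] * qRegCount
--             for qReg in qRegList:
--                 keyList[qRegCount - 1 - measuredQRegsToCRegsDict[qReg]] = k[sourceQRegCount - 1 - qReg]
--             if reverse:
--                 key = ''.join(reversed(keyList))
--             else:
--                 key = ''.join(keyList)
--         else:
--             key = zeroKey
--         if binRet.get(key) is None:
--             binRet[key] = v
--         else:
--             binRet[key] += v
--     return binRet
-- ===== SOURCE B (Python) =====
-- # B: no rank table and no positional scatter buffer -- sort the register pairs once by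
-- # classical target (descending; ascending when reverse) and build every output key by
-- # direct concatenation in that order.  Return-value equivalence only: A rewrites the
-- # values of measuredQRegsToCRegsDict in place to ranks; B never mutates its arguments.
-- from typing import Dict
--
--
-- def filterMeasure(counts: Dict[str, int], measuredQRegsToCRegsDict: Dict[int, int],
--                   reverse: bool = False) -> Dict[str, int]:
--     sourceLen = len(next(iter(counts)))
--     assert sourceLen > 0
--     items = list(measuredQRegsToCRegsDict.items())
--     if max(measuredQRegsToCRegsDict) + 1 > sourceLen:
--         items = [(i, qc[1]) for i, qc in enumerate(sorted(items, key=lambda qc: qc[0]))]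
--     n = len(items)
--     # read the measured bits from the highest classical target down (up when reversed)
--     order = sorted(items, key=lambda qc: qc[1], reverse=not reverse)
--     zeroKey = '0' * n
--     binRet: Dict[str, int] = {}
--     for k, v in counts.items():
--         key = ''.join(k[sourceLen - 1 - q] for q, _ in order)
--         if '1' not in key:
--             key = zeroKey
--         binRet[key] = binRet.get(key, 0) + v
--     return binRet
-- ===== Notes on version B (the rewrite author's own statement) =====
-- stated objective: simpler
-- what changed: B drops A's rank table (list.index over sorted values), hit-scan and positional scatter buffer entirely: it sorts the register pairs once by classical target (descending, ascending when reverse) and builds every output key by direct concatenation of the selected source bits in that order; B also does not mutate the measuredQRegsToCRegsDict argument.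
-- outside the precondition, e.g. on filterMeasure({'1x': 1}, {1: 5, 0: 5}, False): A returns {'0x': 1}, B returns {'1x': 1}
import Mathlib
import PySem

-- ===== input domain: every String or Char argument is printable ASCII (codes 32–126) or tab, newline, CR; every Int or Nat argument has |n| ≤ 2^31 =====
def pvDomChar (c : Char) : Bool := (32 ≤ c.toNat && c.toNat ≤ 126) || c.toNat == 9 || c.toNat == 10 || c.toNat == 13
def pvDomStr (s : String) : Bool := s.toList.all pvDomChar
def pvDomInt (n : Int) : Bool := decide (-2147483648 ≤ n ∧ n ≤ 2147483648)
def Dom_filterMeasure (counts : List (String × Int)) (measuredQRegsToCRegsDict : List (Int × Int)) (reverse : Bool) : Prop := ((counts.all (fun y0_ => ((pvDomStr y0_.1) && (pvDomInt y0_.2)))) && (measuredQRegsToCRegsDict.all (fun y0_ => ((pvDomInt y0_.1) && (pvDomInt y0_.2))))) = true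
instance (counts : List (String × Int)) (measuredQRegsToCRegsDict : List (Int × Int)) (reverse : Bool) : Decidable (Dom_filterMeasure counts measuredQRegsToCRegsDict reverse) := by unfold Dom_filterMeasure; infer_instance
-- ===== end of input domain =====

-- B drops A's rank table, hit-scan and positional scatter buffer: it sorts the register
-- pairs once by classical target (descending, ascending when reverse) and builds every
-- output key by direct concatenation in that order (objective: simpler).
-- Both dict arguments are association lists read through PySem.Dict (the Python
-- call-boundary dict construction). Return-value equivalence only: the Python A
-- rewrites measuredQRegsToCRegsDict's values to ranks in place, B does not mutate.

-- ===== PORT A =====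
-- Literal port of A. Where the Python raises (assert, max([]), IndexError, a
-- targetList.index miss) — all excluded by Pre_ — total stand-in defaults are used.
def filterMeasure (counts : List (String × Int)) (measuredQRegsToCRegsDict : List (Int × Int)) (reverse : Bool) : List (String × Int) :=
  let countsD : PySem.Dict String Int := PySem.Dict.ofList counts
  let mqD0 : PySem.Dict Int Int := PySem.Dict.ofList measuredQRegsToCRegsDict
  -- for key in counts.keys(): sourceQRegCount = len(key); break   (assert sourceQRegCount > 0)
  let sourceQRegCount : Int := PySem.Str.len (countsD.keys.headD "")
  let neededQRegCount : Int := ((PySem.List.max? mqD0.keys (fun x => x)).getD 0) + 1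
  let mqD1 : PySem.Dict Int Int :=
    if neededQRegCount > sourceQRegCount then
      (PySem.List.enumerate (PySem.List.sorted mqD0.keys (fun x => x))).foldl
        (fun d p => d.insert p.1 (mqD0.getD p.2 0)) PySem.Dict.empty
    else mqD0
  let qRegList : List Int := mqD1.keys
  let qRegCount : Nat := mqD1.size
  let targetList : List Int := PySem.List.sorted mqD1.values (fun x => x)
  -- for key in keys(): d[key] = targetList.index(d[key])   (in-place rank remap)
  let mqD2 : PySem.Dict Int Int := mqD1.keys.foldl
    (fun d k => d.insert k (((PySem.List.index? targetList (d.getD k 0)).getD 0 : Nat) : Int)) mqD1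
  let zeroKey : List Char := List.replicate qRegCount '0'
  let binRet : PySem.Dict String Int := countsD.items.foldl (fun br kv =>
    let kc := kv.1.toList
    let hit := qRegList.any (fun q => PySem.List.pyGetD kc (sourceQRegCount - 1 - q) ' ' == '1')
    let key : List Char :=
      if hit then
        let keyList := qRegList.foldl (fun kl q =>
          PySem.List.pySetD kl ((qRegCount : Int) - 1 - mqD2.getD q 0)
            (PySem.List.pyGetD kc (sourceQRegCount - 1 - q) ' ')) (List.replicate qRegCount '0')
        if reverse then keyList.reverse else keyList
      else zeroKey
    let keyS := String.ofList key
    if br.get? keyS = none then br.insert keyS kv.2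
    else br.insert keyS (br.getD keyS 0 + kv.2)) PySem.Dict.empty
  binRet.items

-- ===== PORT B =====
-- Literal port of Source B: sort the register pairs once by classical target
-- (descending, ascending when reverse), then concatenate the selected bits per key.
def filterMeasure_alt (counts : List (String × Int)) (measuredQRegsToCRegsDict : List (Int × Int)) (reverse : Bool) : List (String × Int) :=
  let countsD : PySem.Dict String Int := PySem.Dict.ofList counts
  let mqD : PySem.Dict Int Int := PySem.Dict.ofList measuredQRegsToCRegsDict
  let sourceLen : Int := PySem.Str.len (countsD.keys.headD "")
  let items0 : List (Int × Int) := mqD.items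
  let items1 : List (Int × Int) :=
    if ((PySem.List.max? mqD.keys (fun x => x)).getD 0) + 1 > sourceLen then
      (PySem.List.enumerate (PySem.List.sorted items0 (fun qc => qc.1))).map (fun p => (p.1, p.2.2))
    else items0
  let n : Nat := items1.length
  let order : List (Int × Int) := PySem.List.sorted items1 (fun qc => qc.2) (!reverse)
  let zeroKey : List Char := List.replicate n '0'
  let binRet : PySem.Dict String Int := countsD.items.foldl (fun br kv =>
    let kc := kv.1.toList
    let key0 : List Char := order.map (fun qc => PySem.List.pyGetD kc (sourceLen - 1 - qc.1) ' ')
    let key : List Char := if key0.contains '1' then key0 else zeroKey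
    let keyS := String.ofList key
    br.insert keyS (br.getD keyS 0 + kv.2)) PySem.Dict.empty
  binRet.items

-- ===== PRECONDITION & SPEC =====
-- Pre_ excludes exactly: empty counts / an empty first key (assert fails), an empty
-- register map (max([]) raises), count keys too short for the computed bit indices
-- (IndexError) — and register maps with duplicate classical-register values, where
-- A still returns but the surviving bit of a rank collision and its hit-flag scan
-- are an accident of A's overwrite order (a malformed map; see the cite).
def Pre_filterMeasure (counts : List (String × Int)) (measuredQRegsToCRegsDict : List (Int × Int)) (reverse : Bool) : Prop :=
  counts ≠ [] ∧ measuredQRegsToCRegsDict ≠ [] ∧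
  1 ≤ PySem.Str.len (counts.headD ("", 0)).1 ∧
  (PySem.Dict.ofList measuredQRegsToCRegsDict).values.Nodup ∧
  (∀ p ∈ counts, ∀ q ∈ (if ((PySem.List.max? (PySem.Dict.ofList measuredQRegsToCRegsDict).keys (fun x => x)).getD 0) + 1 >
        PySem.Str.len (counts.headD ("", 0)).1
      then PySem.List.pyRange 0 ((PySem.Dict.ofList measuredQRegsToCRegsDict).size : Int) 1
      else (PySem.Dict.ofList measuredQRegsToCRegsDict).keys),
    PySem.Raise.InRange p.1.toList.length
      (PySem.Str.len (counts.headD ("", 0)).1 - 1 - q))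

instance (counts : List (String × Int)) (measuredQRegsToCRegsDict : List (Int × Int)) (reverse : Bool) : Decidable (Pre_filterMeasure counts measuredQRegsToCRegsDict reverse) := by unfold Pre_filterMeasure; infer_instance

def pvWitness_filterMeasure : (List (String × Int)) × (List (Int × Int)) × Bool :=
  ([("10", 3), ("01", 5)], [(0, 1), (1, 0)], false)

def Spec_filterMeasure (counts : List (String × Int)) (measuredQRegsToCRegsDict : List (Int × Int)) (reverse : Bool) (out : List (String × Int)) : Prop := out = filterMeasure_alt counts measuredQRegsToCRegsDict reverse
instance (counts : List (String × Int)) (measuredQRegsToCRegsDict : List (Int × Int)) (reverse : Bool) (out : List (String × Int)) : Decidable (Spec_filterMeasure counts measuredQRegsToCRegsDict reverse out) := by unfold Spec_filterMeasure; infer_instance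

-- ===== CLAIM (what is proved, stated in full; the proofs are below) =====
def Claim_equal_filterMeasure : Prop := ∀ (counts : List (String × Int)) (measuredQRegsToCRegsDict : List (Int × Int)) (reverse : Bool), Dom_filterMeasure counts measuredQRegsToCRegsDict reverse → Pre_filterMeasure counts measuredQRegsToCRegsDict reverse → Spec_filterMeasure counts measuredQRegsToCRegsDict reverse (filterMeasure counts measuredQRegsToCRegsDict reverse)

-- ===== LEMMAS AND PROOFS =====

-- a scatter loop of in-place writes preserves the length of the buffer
theorem pv_scatter_length {ι α : Type} (ks : List ι) (p : ι → Nat) (x : ι → α) :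
    ∀ (base : List α),
      (ks.foldl (fun l r => l.set (p r) (x r)) base).length = base.length := by
  induction ks with
  | nil => intro base; rfl
  | cons k t ih => intro base; rw [List.foldl_cons, ih, List.length_set]

-- positions never written by the loop keep the base value
theorem pv_scatter_untouched {ι α : Type} (ks : List ι) (p : ι → Nat) (x : ι → α) :
    ∀ (base : List α) (j : Nat), (∀ r ∈ ks, p r ≠ j) →
      (ks.foldl (fun l r => l.set (p r) (x r)) base)[j]? = base[j]? := by
  induction ks with
  | nil => intro base j _; rfl
  | cons k t ih =>
    intro base j hj
    simp only [List.foldl_cons]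
    rw [ih _ _ (fun r hr => hj r (List.mem_cons_of_mem _ hr)),
        List.getElem?_set_ne (hj k (List.mem_cons_self ..))]

-- with injective in-range positions every written value survives
theorem pv_scatter_getElem? {ι α : Type} (ks : List ι) (p : ι → Nat) (x : ι → α) :
    ∀ (base : List α), ks.Nodup → (∀ a ∈ ks, ∀ b ∈ ks, p a = p b → a = b) →
      (∀ q ∈ ks, p q < base.length) → ∀ q ∈ ks,
      (ks.foldl (fun l r => l.set (p r) (x r)) base)[p q]? = some (x q) := by
  induction ks with
  | nil => intro _ _ _ _ q hq; exact absurd hq (List.not_mem_nil)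
  | cons k t ih =>
    intro base hnd hinj hp q hq
    have hknt : k ∉ t := (List.nodup_cons.mp hnd).1
    simp only [List.foldl_cons]
    rcases List.mem_cons.mp hq with rfl | hqt
    · rw [pv_scatter_untouched t p x _ (p q)
        (fun r hr hpr => hknt ((hinj r (List.mem_cons_of_mem _ hr) q (List.mem_cons_self ..) hpr) ▸ hr))]
      rw [List.getElem?_set_self]
      exact hp q (List.mem_cons_self ..)
    · exact ih _ (List.nodup_cons.mp hnd).2
        (fun a ha b hb => hinj a (List.mem_cons_of_mem _ ha) b (List.mem_cons_of_mem _ hb))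
        (fun r hr => by rw [List.length_set]; exact hp r (List.mem_cons_of_mem _ hr)) q hqt

-- keys not in the loop keep their value through an insert loop
theorem pv_fold_insert_getD_untouched (ks : List Int) (f : PySem.Dict Int Int → Int → Int) :
    ∀ (d : PySem.Dict Int Int) (q : Int), q ∉ ks →
      (ks.foldl (fun dd k => dd.insert k (f dd k)) d).getD q 0 = d.getD q 0 := by
  induction ks with
  | nil => intro d q _; rfl
  | cons k t ih =>
    intro d q hq
    simp only [List.foldl_cons]
    rw [ih _ _ (fun h => hq (List.mem_cons_of_mem _ h)),
        PySem.Dict.getD_insert_of_ne _ _ _ (fun h => hq (List.mem_cons.mpr (Or.inl h)))]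

-- A's in-place rank remap: each key ends with g of its original value
theorem pv_fold_remap_getD (g : Int → Int) (d0 : PySem.Dict Int Int) :
    ∀ (ks : List Int) (dd : PySem.Dict Int Int), ks.Nodup →
      (∀ k ∈ ks, dd.getD k 0 = d0.getD k 0) → ∀ q ∈ ks,
      (ks.foldl (fun dd k => dd.insert k (g (dd.getD k 0))) dd).getD q 0 = g (d0.getD q 0) := by
  intro ks
  induction ks with
  | nil => intro dd _ _ q hq; exact absurd hq (List.not_mem_nil)
  | cons k t ih =>
    intro dd hnd hinv q hq
    have hknt : k ∉ t := (List.nodup_cons.mp hnd).1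
    simp only [List.foldl_cons]
    rcases List.mem_cons.mp hq with rfl | hqt
    · rw [pv_fold_insert_getD_untouched t _ _ q hknt,
          PySem.Dict.getD_insert_self, hinv q (List.mem_cons_self ..)]
    · exact ih _ (List.nodup_cons.mp hnd).2
        (fun k' hk' => by
          rw [PySem.Dict.getD_insert_of_ne _ _ _ (fun h : k' = k => hknt (h ▸ hk'))]
          exact hinv k' (List.mem_cons_of_mem _ hk')) q hqt

-- proof-only abbreviations for the sorted value list and the rank of a key's value
def pvOrder (d1 : PySem.Dict Int Int) : List Int := PySem.List.sorted d1.values (fun x => x)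
def pvRank (d1 : PySem.Dict Int Int) (q : Int) : Nat :=
  (PySem.List.index? (pvOrder d1) (d1.getD q 0)).getD 0

theorem pv_rank_spec (d1 : PySem.Dict Int Int) (hk : d1.keys.Nodup) (q : Int) (hq : q ∈ d1.keys) :
    pvRank d1 q < d1.size ∧
      ∃ h : pvRank d1 q < (pvOrder d1).length, (pvOrder d1)[pvRank d1 q]'h = d1.getD q 0 := by
  have hmem : d1.getD q 0 ∈ pvOrder d1 := by
    rw [pvOrder, PySem.List.mem_sorted, PySem.Dict.values_eq_map_keys d1 hk 0]
    exact List.mem_map_of_mem hq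
  obtain ⟨k, hkk⟩ := Option.isSome_iff_exists.mp ((PySem.List.index?_isSome_iff _ _).mpr hmem)
  obtain ⟨hlt, hget, -⟩ := PySem.List.getElem_of_index?_eq_some hkk
  have hrk : pvRank d1 q = k := by rw [pvRank, hkk]; rfl
  have hol : (pvOrder d1).length = d1.size := by
    rw [pvOrder, PySem.List.length_sorted]
    simp [PySem.Dict.values, PySem.Dict.size]
  refine ⟨by omega, by rw [hrk]; exact ⟨hlt, hget⟩⟩

theorem pv_rank_inj (d1 : PySem.Dict Int Int) (hk : d1.keys.Nodup) (hv : d1.values.Nodup) :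
    ∀ a ∈ d1.keys, ∀ b ∈ d1.keys, pvRank d1 a = pvRank d1 b → a = b := by
  intro a ha b hb hr
  obtain ⟨-, ha1, ha2⟩ := pv_rank_spec d1 hk a ha
  obtain ⟨-, hb1, hb2⟩ := pv_rank_spec d1 hk b hb
  have hvals : (d1.keys.map (fun k => d1.getD k 0)).Nodup := by
    rw [← PySem.Dict.values_eq_map_keys d1 hk 0]; exact hv
  refine List.inj_on_of_nodup_map hvals ha hb ?_
  rw [← ha2, ← hb2]; simp only [hr]

-- enumerate of a mapped list enumerates the originals (needed for the re-index branch)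
theorem pv_enumerate_map {α β : Type} (f : α → β) (l : List α) :
    ∀ (s : Int), PySem.List.enumerate (l.map f) s
      = (PySem.List.enumerate l s).map (fun p => (p.1, f p.2)) := by
  induction l with
  | nil => intro s; rfl
  | cons x t ih =>
    intro s
    simp only [List.map_cons, PySem.List.enumerate_cons, ih]

-- the stable sort of the items by key equals the sorted keys paired with their values
theorem pv_sorted_items_fst (d : PySem.Dict Int Int) (hk : d.keys.Nodup) :
    PySem.List.sorted d.items (fun qc => qc.1) false
      = (PySem.List.sorted d.keys (fun x => x) false).map (fun k => (k, d.getD k 0)) := by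
  apply PySem.List.sorted_eq_of_perm_of_pairwise_lt
  · rw [PySem.Dict.items_eq_map_keys d hk 0]
    exact (PySem.List.sorted_perm _ _ _).map _
  · rw [List.pairwise_map]
    have hle : (PySem.List.sorted d.keys (fun x => x) false).Pairwise (· ≤ ·) :=
      PySem.List.sorted_pairwise _ _
    have hne : (PySem.List.sorted d.keys (fun x => x) false).Pairwise (· ≠ ·) :=
      ((PySem.List.sorted_perm _ _ _).nodup_iff).mpr hk
    exact (hle.and hne).imp (fun h => lt_of_le_of_ne h.1 h.2)

-- the value list of the ascending-by-value sort of the items is A's targetList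
theorem pv_sorted_snd (d : PySem.Dict Int Int) (hv : d.values.Nodup) :
    (PySem.List.sorted d.items (fun qc => qc.2) false).map (fun qc => qc.2) = pvOrder d := by
  symm
  apply PySem.List.sorted_eq_of_perm_of_pairwise_lt
  · have h1 := (PySem.List.sorted_perm d.items (fun qc => qc.2) false).map (fun qc => qc.2)
    simpa [PySem.Dict.values] using h1
  · have hle : ((PySem.List.sorted d.items (fun qc => qc.2) false).map (fun qc => qc.2)).Pairwise (· ≤ ·) := by
      rw [List.pairwise_map]
      exact PySem.List.sorted_pairwise _ _
    have hnd : ((PySem.List.sorted d.items (fun qc => qc.2) false).map (fun qc => qc.2)).Nodup := by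
      refine (List.Perm.nodup_iff ?_).mpr hv
      have h1 := (PySem.List.sorted_perm d.items (fun qc => qc.2) false).map (fun qc => qc.2)
      simpa [PySem.Dict.values] using h1
    exact (hle.and hnd).imp (fun h => lt_of_le_of_ne h.1 h.2)

-- the descending-by-value sort is the reverse of the ascending one (distinct values)
theorem pv_sorted_desc (d : PySem.Dict Int Int) (hv : d.values.Nodup) :
    PySem.List.sorted d.items (fun qc => qc.2) true
      = (PySem.List.sorted d.items (fun qc => qc.2) false).reverse := by
  apply PySem.List.sorted_rev_eq_of_perm_of_pairwise_gt
  · exact (List.reverse_perm _).trans (PySem.List.sorted_perm _ _ _)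
  · rw [List.pairwise_reverse]
    have hle : (PySem.List.sorted d.items (fun qc => qc.2) false).Pairwise
        (fun a b => a.2 ≤ b.2) := PySem.List.sorted_pairwise _ _
    have hnd : ((PySem.List.sorted d.items (fun qc => qc.2) false).map (fun qc => qc.2)).Nodup := by
      refine (List.Perm.nodup_iff ?_).mpr hv
      have h1 := (PySem.List.sorted_perm d.items (fun qc => qc.2) false).map (fun qc => qc.2)
      simpa [PySem.Dict.values] using h1
    have hne : (PySem.List.sorted d.items (fun qc => qc.2) false).Pairwise
        (fun a b => a.2 ≠ b.2) := List.pairwise_map.mp hnd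
    exact (hle.and hne).imp (fun h => lt_of_le_of_ne h.1 h.2)

-- the rank (index in A's targetList) of the i-th item of the ascending sort is i
theorem pv_rank_sorted (d : PySem.Dict Int Int) (hk : d.keys.Nodup) (hv : d.values.Nodup)
    (i : Nat) (hi : i < (PySem.List.sorted d.items (fun qc => qc.2) false).length) :
    pvRank d ((PySem.List.sorted d.items (fun qc => qc.2) false)[i].1) = i := by
  have hsnd := pv_sorted_snd d hv
  have hone : (pvOrder d).length = (PySem.List.sorted d.items (fun qc => qc.2) false).length := by
    rw [← hsnd, List.length_map]
  have hmem : (PySem.List.sorted d.items (fun qc => qc.2) false)[i] ∈ d.items := by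
    have h1 : (PySem.List.sorted d.items (fun qc => qc.2) false)[i]
        ∈ PySem.List.sorted d.items (fun qc => qc.2) false := List.getElem_mem hi
    rw [PySem.List.mem_sorted] at h1; exact h1
  have hgetD : d.getD ((PySem.List.sorted d.items (fun qc => qc.2) false)[i].1) 0
      = (PySem.List.sorted d.items (fun qc => qc.2) false)[i].2 :=
    PySem.Dict.getD_of_mem_items d (by simpa using hmem) hk 0
  have hOi? : (pvOrder d)[i]? = some ((PySem.List.sorted d.items (fun qc => qc.2) false)[i].2) := by
    rw [← hsnd, List.getElem?_map, List.getElem?_eq_getElem hi]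
    rfl
  obtain ⟨hlt', hval⟩ := List.getElem?_eq_some_iff.mp hOi?
  have hnodO : (pvOrder d).Nodup := ((PySem.List.sorted_perm _ _ _).nodup_iff).mpr hv
  have hidx : PySem.List.index? (pvOrder d)
      (d.getD ((PySem.List.sorted d.items (fun qc => qc.2) false)[i].1) 0) = some i := by
    rw [hgetD, PySem.List.index?_eq_idxOf?, List.idxOf?_eq_some_iff]
    refine ⟨hlt', hval, ?_⟩
    intro j hj hEq
    have hji : (pvOrder d)[j]'(by omega) = (pvOrder d)[i]'hlt' := by rw [hval, hEq]
    have : j = i := (List.Nodup.getElem_inj_iff hnodO).mp hji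
    omega
  rw [pvRank, hidx]
  rfl

-- A's hit-scan + scatter at mirrored rank positions IS the descending-sorted gather
theorem pv_scatter_eq_sorted (d1 : PySem.Dict Int Int) (hk : d1.keys.Nodup) (hv : d1.values.Nodup)
    (char : Int → Char) :
    d1.keys.foldl (fun kl q => kl.set (d1.size - 1 - pvRank d1 q) (char q)) (List.replicate d1.size '0')
      = (PySem.List.sorted d1.items (fun qc => qc.2) false).reverse.map (fun qc => char qc.1) := by
  have hslen : (PySem.List.sorted d1.items (fun qc => qc.2) false).length = d1.size := by
    rw [PySem.List.length_sorted]; rfl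
  apply List.ext_getElem?
  intro j
  by_cases hj : j < d1.size
  · have hidx : d1.size - 1 - j < (PySem.List.sorted d1.items (fun qc => qc.2) false).length := by
      omega
    have hqmem : (PySem.List.sorted d1.items (fun qc => qc.2) false)[d1.size - 1 - j] ∈ d1.items := by
      have h1 := List.getElem_mem hidx
      rw [PySem.List.mem_sorted] at h1; exact h1
    have hqkeys : (PySem.List.sorted d1.items (fun qc => qc.2) false)[d1.size - 1 - j].1 ∈ d1.keys :=
      PySem.Dict.mem_keys_of_mem_items d1 hqmem
    have hrank : pvRank d1 ((PySem.List.sorted d1.items (fun qc => qc.2) false)[d1.size - 1 - j].1)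
        = d1.size - 1 - j := pv_rank_sorted d1 hk hv _ hidx
    have hinj : ∀ a ∈ d1.keys, ∀ b ∈ d1.keys,
        d1.size - 1 - pvRank d1 a = d1.size - 1 - pvRank d1 b → a = b := by
      intro a ha b hb h
      have la := (pv_rank_spec d1 hk a ha).1
      have lb := (pv_rank_spec d1 hk b hb).1
      exact pv_rank_inj d1 hk hv a ha b hb (by omega)
    have hbound : ∀ q ∈ d1.keys,
        d1.size - 1 - pvRank d1 q < (List.replicate d1.size '0').length := by
      intro q hq
      rw [List.length_replicate]
      have := (pv_rank_spec d1 hk q hq).1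
      omega
    have hL := pv_scatter_getElem? d1.keys (fun q => d1.size - 1 - pvRank d1 q)
      (fun q => char q) (List.replicate d1.size '0') hk hinj hbound _ hqkeys
    simp only at hL
    rw [hrank, show d1.size - 1 - (d1.size - 1 - j) = j from by omega] at hL
    rw [hL]
    have hjr : j < (PySem.List.sorted d1.items (fun qc => qc.2) false).reverse.length := by
      rw [List.length_reverse, hslen]; exact hj
    rw [List.getElem?_map, List.getElem?_eq_getElem hjr, List.getElem_reverse]
    have hix : (PySem.List.sorted d1.items (fun qc => qc.2) false).length - 1 - j
        = d1.size - 1 - j := by omega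
    simp only [hix, Option.map_some]
  · rw [List.getElem?_eq_none (by rw [pv_scatter_length, List.length_replicate]; omega),
        List.getElem?_eq_none (by rw [List.length_map, List.length_reverse, hslen]; omega)]

-- A's hit flag is '1'-membership of the gathered key
theorem pv_hit_eq (d1 : PySem.Dict Int Int) (hk : d1.keys.Nodup) (L : Int) (kc : List Char)
    (rev : Bool) :
    (d1.keys.any (fun q => PySem.List.pyGetD kc (L - 1 - q) ' ' == '1'))
      = ((PySem.List.sorted d1.items (fun qc => qc.2) rev).map
          (fun qc => PySem.List.pyGetD kc (L - 1 - qc.1) ' ')).contains '1' := by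
  have hiff : (d1.keys.any (fun q => PySem.List.pyGetD kc (L - 1 - q) ' ' == '1')) = true
      ↔ ((PySem.List.sorted d1.items (fun qc => qc.2) rev).map
          (fun qc => PySem.List.pyGetD kc (L - 1 - qc.1) ' ')).contains '1' = true := by
    rw [List.any_eq_true, List.contains_iff_mem, List.mem_map]
    constructor
    · rintro ⟨q, hq, hbeq⟩
      refine ⟨(q, d1.getD q 0), ?_, by simpa using hbeq⟩
      rw [PySem.List.mem_sorted, PySem.Dict.items_eq_map_keys d1 hk 0]
      exact List.mem_map_of_mem hq
    · rintro ⟨qc, hqc, hc⟩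
      rw [PySem.List.mem_sorted] at hqc
      refine ⟨qc.1, PySem.Dict.mem_keys_of_mem_items d1 hqc, by simpa using hc⟩
  exact Bool.coe_iff_coe.mp hiff

-- the heart of the claim: A's per-key hit-scan + rank scatter + reversal computes
-- exactly B's concatenation over the value-sorted register pairs
theorem pv_key_eq (d1 : PySem.Dict Int Int) (L : Int) (reverse : Bool) (kc : List Char)
    (hk : d1.keys.Nodup) (hv : d1.values.Nodup) :
    (if (d1.keys.any (fun q => PySem.List.pyGetD kc (L - 1 - q) ' ' == '1')) then
      if reverse then (d1.keys.foldl (fun kl q => PySem.List.pySetD kl ((d1.size : Int) - 1 - (d1.keys.foldl (fun d k => d.insert k (((PySem.List.index? (PySem.List.sorted d1.values (fun x => x)) (d.getD k 0)).getD 0 : Nat) : Int)) d1).getD q 0) (PySem.List.pyGetD kc (L - 1 - q) ' ')) (List.replicate d1.size '0')).reverse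
      else d1.keys.foldl (fun kl q => PySem.List.pySetD kl ((d1.size : Int) - 1 - (d1.keys.foldl (fun d k => d.insert k (((PySem.List.index? (PySem.List.sorted d1.values (fun x => x)) (d.getD k 0)).getD 0 : Nat) : Int)) d1).getD q 0) (PySem.List.pyGetD kc (L - 1 - q) ' ')) (List.replicate d1.size '0')
    else List.replicate d1.size '0')
    = (if ((PySem.List.sorted d1.items (fun qc => qc.2) (!reverse)).map (fun qc => PySem.List.pyGetD kc (L - 1 - qc.1) ' ')).contains '1'
      then (PySem.List.sorted d1.items (fun qc => qc.2) (!reverse)).map (fun qc => PySem.List.pyGetD kc (L - 1 - qc.1) ' ')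
      else List.replicate d1.items.length '0') := by
  have hrlt : ∀ q ∈ d1.keys, pvRank d1 q < d1.size := fun q hq => (pv_rank_spec d1 hk q hq).1
  have hmq2 : ∀ q ∈ d1.keys, (d1.keys.foldl (fun d k => d.insert k (((PySem.List.index? (PySem.List.sorted d1.values (fun x => x)) (d.getD k 0)).getD 0 : Nat) : Int)) d1).getD q 0 = ((pvRank d1 q : Nat) : Int) :=
    fun q hq => pv_fold_remap_getD
      (fun v => (((PySem.List.index? (PySem.List.sorted d1.values (fun x => x)) v).getD 0 : Nat) : Int)) d1 d1.keys d1 hk (fun _ _ => rfl) q hq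
  have hA : (d1.keys.foldl (fun kl q => PySem.List.pySetD kl ((d1.size : Int) - 1 - (d1.keys.foldl (fun d k => d.insert k (((PySem.List.index? (PySem.List.sorted d1.values (fun x => x)) (d.getD k 0)).getD 0 : Nat) : Int)) d1).getD q 0) (PySem.List.pyGetD kc (L - 1 - q) ' ')) (List.replicate d1.size '0')) = d1.keys.foldl (fun kl q => kl.set (d1.size - 1 - pvRank d1 q) (PySem.List.pyGetD kc (L - 1 - q) ' ')) (List.replicate d1.size '0') := by
    refine PySem.List.foldl_congr_mem _ _ _ _ ?_
    intro acc q hq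
    rw [hmq2 q hq, PySem.List.pySetD_of_nonneg _ _ (by have := hrlt q hq; omega)]
    congr 1
    have := hrlt q hq
    omega
  rw [hA, pv_scatter_eq_sorted d1 hk hv (fun q => PySem.List.pyGetD kc (L - 1 - q) ' '),
      pv_hit_eq d1 hk L kc (!reverse)]
  have hzero : (List.replicate d1.size '0') = List.replicate d1.items.length '0' := rfl
  cases reverse with
  | false =>
    rw [Bool.not_false, pv_sorted_desc d1 hv, hzero, List.map_reverse]
    simp
  | true =>
    rw [Bool.not_true, hzero, List.map_reverse, List.reverse_reverse]
    simp

-- the duplicate-merging update of A equals B's get-default form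
theorem pv_update_eq (br : PySem.Dict String Int) (S : String) (v : Int) :
    (if br.get? S = none then br.insert S v else br.insert S (br.getD S 0 + v))
      = br.insert S (br.getD S 0 + v) := by
  by_cases h : br.get? S = none
  · rw [if_pos h, PySem.Dict.getD_of_get?_eq_none _ _ h, Int.zero_add]
  · rw [if_neg h]

theorem pv_main (counts : List (String × Int)) (mq : List (Int × Int)) (reverse : Bool)
    (hpre : Pre_filterMeasure counts mq reverse) :
    filterMeasure counts mq reverse = filterMeasure_alt counts mq reverse := by
  obtain ⟨-, -, -, hv0, -⟩ := hpre
  simp only [filterMeasure, filterMeasure_alt]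
  set d1 := (if ((PySem.List.max? (PySem.Dict.ofList mq).keys (fun x => x)).getD 0) + 1 >
        PySem.Str.len ((PySem.Dict.ofList counts).keys.headD "") then
      (PySem.List.enumerate (PySem.List.sorted (PySem.Dict.ofList mq).keys (fun x => x))).foldl
        (fun d p => d.insert p.1 ((PySem.Dict.ofList mq).getD p.2 0)) PySem.Dict.empty
    else PySem.Dict.ofList mq) with hd1
  have hk1 : d1.keys.Nodup := by
    rw [hd1]
    split_ifs with h
    · exact PySem.Dict.nodup_keys_foldl_insert_key _ (fun p : Int × Int => p.1)
        (fun (_ : PySem.Dict Int Int) (p : Int × Int) => (PySem.Dict.ofList mq).getD p.2 0) _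
        PySem.Dict.nodup_keys_empty
    · exact PySem.Dict.nodup_keys_ofList _
  have hitemsA : ((PySem.List.enumerate (PySem.List.sorted (PySem.Dict.ofList mq).keys (fun x => x))).foldl
        (fun d p => d.insert p.1 ((PySem.Dict.ofList mq).getD p.2 0)) PySem.Dict.empty).items
      = (PySem.List.enumerate (PySem.List.sorted (PySem.Dict.ofList mq).keys (fun x => x))).map
          (fun p => (p.1, (PySem.Dict.ofList mq).getD p.2 0)) := by
    have hnd : ((PySem.List.enumerate (PySem.List.sorted (PySem.Dict.ofList mq).keys (fun x => x))).map (fun p => p.1)).Nodup := by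
      rw [PySem.List.map_fst_enumerate]
      exact PySem.List.nodup_pyRange_one _ _
    have h := PySem.Dict.items_foldl_insert_fresh
      (PySem.List.enumerate (PySem.List.sorted (PySem.Dict.ofList mq).keys (fun x => x)))
      (fun p => p.1) (fun p => (PySem.Dict.ofList mq).getD p.2 0) PySem.Dict.empty
      (fun a _ => rfl) hnd
    simpa using h
  have hBitems : (if ((PySem.List.max? (PySem.Dict.ofList mq).keys (fun x => x)).getD 0) + 1 >
        PySem.Str.len ((PySem.Dict.ofList counts).keys.headD "") then
      (PySem.List.enumerate (PySem.List.sorted (PySem.Dict.ofList mq).items (fun qc => qc.1))).map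
        (fun p => (p.1, p.2.2))
    else (PySem.Dict.ofList mq).items) = d1.items := by
    rw [hd1]
    split_ifs with h
    · rw [hitemsA, pv_sorted_items_fst (PySem.Dict.ofList mq) (PySem.Dict.nodup_keys_ofList _),
          pv_enumerate_map, List.map_map]
      rfl
    · rfl
  have hv1 : d1.values.Nodup := by
    rw [hd1]
    split_ifs with h
    · show (((PySem.List.enumerate (PySem.List.sorted (PySem.Dict.ofList mq).keys (fun x => x))).foldl
        (fun d p => d.insert p.1 ((PySem.Dict.ofList mq).getD p.2 0)) PySem.Dict.empty).items.map (fun p => p.2)).Nodup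
      rw [hitemsA, List.map_map]
      have h2 : ((PySem.List.enumerate (PySem.List.sorted (PySem.Dict.ofList mq).keys (fun x => x))).map
          ((fun p : Int × Int => p.2) ∘ (fun p : Int × Int => (p.1, (PySem.Dict.ofList mq).getD p.2 0))))
          = (PySem.List.sorted (PySem.Dict.ofList mq).keys (fun x => x)).map
              (fun q => (PySem.Dict.ofList mq).getD q 0) := by
        have h3 := congrArg (List.map (fun q => (PySem.Dict.ofList mq).getD q 0))
          (PySem.List.map_snd_enumerate (PySem.List.sorted (PySem.Dict.ofList mq).keys (fun x => x)) 0)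
        rw [List.map_map] at h3
        exact h3
      rw [h2]
      have hperm : ((PySem.List.sorted (PySem.Dict.ofList mq).keys (fun x => x)).map
          (fun q => (PySem.Dict.ofList mq).getD q 0)).Perm
          ((PySem.Dict.ofList mq).keys.map (fun q => (PySem.Dict.ofList mq).getD q 0)) :=
        (PySem.List.sorted_perm _ _ _).map _
      have hkm : ((PySem.Dict.ofList mq).keys.map (fun q => (PySem.Dict.ofList mq).getD q 0)).Nodup := by
        rw [← PySem.Dict.values_eq_map_keys _ (PySem.Dict.nodup_keys_ofList _) 0]
        exact hv0
      exact hperm.symm.nodup hkm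
    · exact hv0
  rw [hBitems]
  refine congrArg PySem.Dict.items ?_
  refine List.foldl_ext _ _ _ ?_
  intro br kv _
  rw [pv_key_eq d1 (PySem.Str.len ((PySem.Dict.ofList counts).keys.headD "")) reverse kv.1.toList hk1 hv1]
  exact pv_update_eq _ _ _

-- ===== VERDICT (by name: the statement is the Claim_ definition above) =====
theorem filterMeasure_spec : Claim_equal_filterMeasure := by
  intro counts mq reverse _ hpre
  exact pv_main counts mq reverse hpre
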